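-- pv_equiv track=rewrite | github.com/srlabUsask/Architectural_visualization | app/DocumentNodes.py | remove_similar_patterns
-- ===== SOURCE A (Python) =====
-- def remove_similar_patterns(patterns):
--     ''' Ignore similar patterns and keep the lengthy one. '''
--
--     similar_pattern_removed = {}
--
--     for pattern in patterns:
--         if pattern[1][0] in similar_pattern_removed:
--             if len(similar_pattern_removed[pattern[1][0]]) < len(pattern[1]):
--                 similar_pattern_removed[pattern[1][0]] = pattern[1]
--         else:
--             similar_pattern_removed[pattern[1][0]] = pattern[1]
--
--     return list(similar_pattern_removed.values())
-- ===== SOURCE B (Python) =====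
-- def remove_similar_patterns(patterns):
--     ''' Group patterns by pattern[1][0] first, then keep each group's first longest member. '''
--     groups = {}
--     for pattern in patterns:
--         groups.setdefault(pattern[1][0], []).append(pattern[1])
--     return [max(group, key=len) for group in groups.values()]
-- ===== Notes on version B (the rewrite author's own statement) =====
-- stated objective: alternative
-- what changed: Replaces A's online compare-and-replace dict update with a two-phase decomposition: one pass grouping every pattern[1] into lists keyed by pattern[1][0], then a reducing pass taking each group's first longest member with max(key=len).
import Mathlib
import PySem

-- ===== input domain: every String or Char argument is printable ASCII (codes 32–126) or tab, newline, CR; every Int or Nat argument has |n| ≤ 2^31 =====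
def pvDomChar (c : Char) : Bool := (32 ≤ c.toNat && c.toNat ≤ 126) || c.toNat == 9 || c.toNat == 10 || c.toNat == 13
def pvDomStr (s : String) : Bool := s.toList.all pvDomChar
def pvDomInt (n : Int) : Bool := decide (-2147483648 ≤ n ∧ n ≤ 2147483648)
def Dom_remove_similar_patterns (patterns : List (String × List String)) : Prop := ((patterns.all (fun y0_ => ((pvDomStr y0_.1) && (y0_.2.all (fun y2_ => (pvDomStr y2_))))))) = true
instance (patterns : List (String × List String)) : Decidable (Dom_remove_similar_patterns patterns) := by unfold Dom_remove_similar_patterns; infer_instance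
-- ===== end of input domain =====

-- B replaces A's online compare-and-replace with a two-phase decomposition (group bodies by their first element, then reduce each group to its first longest member); equal returns proved on inputs whose pattern bodies are nonempty (A raises IndexError otherwise).


-- ===== PORT A =====
def remove_similar_patterns (patterns : List (String × List String)) : List (List String) :=
  (patterns.foldl (fun d p =>
      match PySem.List.pyGet? p.2 0 with    -- pattern[1][0]; none = IndexError, excluded by Pre_
      | none => d
      | some k =>
        if d.contains k then
          if (d.getD k []).length < p.2.length then d.insert k p.2 else d
        else d.insert k p.2)
    PySem.Dict.empty).values

-- ===== PORT B =====
def remove_similar_patterns_alt (patterns : List (String × List String)) : List (List String) :=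
  ((patterns.foldl (fun g p =>
      match PySem.List.pyGet? p.2 0 with    -- pattern[1][0]; none = IndexError, excluded by Pre_
      | none => g
      | some k => g.modify k [] (· ++ [p.2]))   -- groups.setdefault(k, []).append(pattern[1])
    PySem.Dict.empty).values).map
    (fun group => PySem.List.maxD group (fun g => g.length) [])   -- max(group, key=len)

-- ===== PRECONDITION & SPEC =====
-- Pre_ excludes exactly the inputs where some pattern[1] is empty: there A (and B alike) raise IndexError on pattern[1][0].
def Pre_remove_similar_patterns (patterns : List (String × List String)) : Prop :=
  ∀ p ∈ patterns, p.2 ≠ []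
instance (patterns : List (String × List String)) : Decidable (Pre_remove_similar_patterns patterns) := by unfold Pre_remove_similar_patterns; infer_instance
def pvWitness_remove_similar_patterns : (List (String × List String)) :=
  [("p", ["ax", "by"]), ("q", ["ax"]), ("r", ["c"])]
def Spec_remove_similar_patterns (patterns : List (String × List String)) (out : List (List String)) : Prop := out = remove_similar_patterns_alt patterns
instance (patterns : List (String × List String)) (out : List (List String)) : Decidable (Spec_remove_similar_patterns patterns out) := by unfold Spec_remove_similar_patterns; infer_instance

-- ===== CLAIM (what is proved, stated in full; the proofs are below) =====
def Claim_equal_remove_similar_patterns : Prop := ∀ (patterns : List (String × List String)), Dom_remove_similar_patterns patterns → Pre_remove_similar_patterns patterns → Spec_remove_similar_patterns patterns (remove_similar_patterns patterns)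

-- ===== LEMMAS AND PROOFS =====

-- the grouping key pattern[1][0] (total form; equals the real key whenever p.2 ≠ [])
def pvKey (p : String × List String) : String := (PySem.List.pyGet? p.2 0).getD ""
-- the group of pattern bodies sharing key c, in input order
def pvGrp (l : List (String × List String)) (c : String) : List (List String) :=
  (l.filter (fun p => pvKey p == c)).map (·.2)
-- A's per-key update step: exactly the fold inside PySem.List.max? with key = length
def pvStep (acc : Option (List String)) (x : List String) : Option (List String) :=
  match acc with
  | none => some x
  | some m => if m.length < x.length then some x else some m

theorem pvKey_some (p : String × List String) (h : p.2 ≠ []) :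
    PySem.List.pyGet? p.2 0 = some (pvKey p) := by
  obtain ⟨s, l2⟩ := p
  cases l2 with
  | nil => exact absurd rfl h
  | cons a t => simp [pvKey, PySem.List.pyGet?, PySem.List.pyIdx?]

theorem pvGrp_cons (p : String × List String) (t : List (String × List String)) (c : String) :
    pvGrp (p :: t) c = if pvKey p == c then p.2 :: pvGrp t c else pvGrp t c := by
  simp only [pvGrp, List.filter_cons]
  split <;> simp

theorem A_get? (l : List (String × List String)) :
    ∀ (d : PySem.Dict String (List String)) (c : String), (∀ p ∈ l, p.2 ≠ []) →
    (l.foldl (fun d p =>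
      match PySem.List.pyGet? p.2 0 with
      | none => d
      | some k =>
        if d.contains k then
          if (d.getD k []).length < p.2.length then d.insert k p.2 else d
        else d.insert k p.2) d).get? c =
    (pvGrp l c).foldl pvStep (d.get? c) := by
  induction l with
  | nil => intro d c _; rfl
  | cons p t ih =>
    intro d c h
    have hp : p.2 ≠ [] := h p (List.mem_cons_self)
    have ht : ∀ q ∈ t, q.2 ≠ [] := fun q hq => h q (List.mem_cons_of_mem _ hq)
    simp only [List.foldl_cons, pvKey_some p hp]
    by_cases hceq : pvKey p = c
    · -- c is p's key: the step performs exactly pvStep on d's entry at c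
      subst hceq
      have hseed : (if d.contains (pvKey p) then
          if (d.getD (pvKey p) []).length < p.2.length then d.insert (pvKey p) p.2 else d
        else d.insert (pvKey p) p.2).get? (pvKey p) = pvStep (d.get? (pvKey p)) p.2 := by
        by_cases hcont : d.contains (pvKey p)
        · have hsome : (d.get? (pvKey p)).isSome := by
            rw [← PySem.Dict.contains_eq_isSome_get?]; exact hcont
          obtain ⟨m, hm⟩ := Option.isSome_iff_exists.mp hsome
          rw [PySem.Dict.getD_eq_get?_getD, hm]
          simp only [hcont, if_true, Option.getD_some]
          by_cases hlt : m.length < p.2.length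
          · rw [if_pos hlt, PySem.Dict.get?_insert_self]
            simp [pvStep, hlt]
          · rw [if_neg hlt, hm]
            simp [pvStep, hlt]
        · have hnone : d.get? (pvKey p) = none :=
            (PySem.Dict.get?_eq_none_iff_contains _ _).mpr (by simpa using hcont)
          simp only [hcont, if_false, Bool.false_eq_true]
          rw [PySem.Dict.get?_insert_self, hnone]
          rfl
      rw [ih _ _ ht, hseed, pvGrp_cons, if_pos (by simp), List.foldl_cons]
    · -- p goes to another key: d's entry at c is untouched by this step
      have hseed : (if d.contains (pvKey p) then
          if (d.getD (pvKey p) []).length < p.2.length then d.insert (pvKey p) p.2 else d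
        else d.insert (pvKey p) p.2).get? c = d.get? c := by
        have hne : c ≠ pvKey p := fun he => hceq he.symm
        by_cases hcont : d.contains (pvKey p)
        · simp only [hcont, if_true]
          by_cases hlt : (d.getD (pvKey p) []).length < p.2.length
          · rw [if_pos hlt, PySem.Dict.get?_insert_of_ne _ _ hne]
          · rw [if_neg hlt]
        · simp only [hcont, if_false, Bool.false_eq_true]
          rw [PySem.Dict.get?_insert_of_ne _ _ hne]
      rw [ih _ _ ht, hseed, pvGrp_cons, if_neg (by simpa using hceq)]

theorem A_keys (l : List (String × List String)) :
    ∀ (d : PySem.Dict String (List String)), (∀ p ∈ l, p.2 ≠ []) →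
    (l.foldl (fun d p =>
      match PySem.List.pyGet? p.2 0 with
      | none => d
      | some k =>
        if d.contains k then
          if (d.getD k []).length < p.2.length then d.insert k p.2 else d
        else d.insert k p.2) d).keys =
    PySem.Set.update d.keys (l.map pvKey) := by
  induction l with
  | nil => intro d _; rfl
  | cons p t ih =>
    intro d h
    have hp : p.2 ≠ [] := h p (List.mem_cons_self)
    have ht : ∀ q ∈ t, q.2 ≠ [] := fun q hq => h q (List.mem_cons_of_mem _ hq)
    simp only [List.foldl_cons, pvKey_some p hp, List.map_cons]
    have hupd : PySem.Set.update d.keys (pvKey p :: t.map pvKey) =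
        PySem.Set.update (PySem.Set.add d.keys (pvKey p)) (t.map pvKey) := rfl
    rw [hupd]
    by_cases hcont : d.contains (pvKey p)
    · have hmem : pvKey p ∈ d.keys := (PySem.Dict.contains_iff_mem_keys _ _).mp hcont
      have hadd : PySem.Set.add d.keys (pvKey p) = d.keys := by
        simp [PySem.Set.add, PySem.Set.contains, hmem]
      rw [hadd]
      by_cases hlt : (d.getD (pvKey p) []).length < p.2.length
      · simp only [hcont, if_true, if_pos hlt]
        rw [ih _ ht, PySem.Dict.keys_insert_of_contains _ _ hcont]
      · simp only [hcont, if_true, if_neg hlt]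
        exact ih _ ht
    · have hmem : pvKey p ∉ d.keys := fun hm =>
        hcont ((PySem.Dict.contains_iff_mem_keys _ _).mpr hm)
      have hadd : PySem.Set.add d.keys (pvKey p) = d.keys ++ [pvKey p] := by
        simp [PySem.Set.add, PySem.Set.contains, hmem]
      simp only [hcont, if_false, Bool.false_eq_true]
      rw [ih _ ht, PySem.Dict.keys_insert_of_not_contains _ _ (by simpa using hcont), hadd]

theorem B_dict_eq (l : List (String × List String)) (h : ∀ p ∈ l, p.2 ≠ []) :
    (l.foldl (fun g p =>
      match PySem.List.pyGet? p.2 0 with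
      | none => g
      | some k => g.modify k [] (· ++ [p.2])) PySem.Dict.empty) =
    (l.foldl (fun g p => g.modify (pvKey p) [] (· ++ [p.2])) PySem.Dict.empty) := by
  apply PySem.List.foldl_congr_mem
  intro acc p hmem
  rw [pvKey_some p (h p hmem)]

theorem B_getD (l : List (String × List String)) (c : String) :
    (l.foldl (fun g p => g.modify (pvKey p) [] (· ++ [p.2])) PySem.Dict.empty).getD c [] =
    pvGrp l c := by
  have hmap : ((l.map (fun p => (pvKey p, p.2))).foldl
      (fun d q => d.modify q.1 [] (· ++ [q.2]))
      (PySem.Dict.empty : PySem.Dict String (List (List String)))) =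
      l.foldl (fun g p => g.modify (pvKey p) [] (· ++ [p.2])) PySem.Dict.empty := by
    rw [List.foldl_map]
  rw [← hmap, PySem.Dict.getD_foldl_modify_append, PySem.Dict.getD_empty]
  simp only [List.nil_append, pvGrp, List.filter_map, List.map_map]
  rfl

theorem foldl_pvStep_getD (gs : List (List String)) :
    (gs.foldl pvStep none).getD [] = PySem.List.maxD gs (fun g => g.length) [] := by
  simp only [PySem.List.maxD, PySem.List.max?]
  congr 2
  funext acc x
  cases acc <;> rfl

-- ===== VERDICT (by name: the statement is the Claim_ definition above) =====
theorem remove_similar_patterns_spec : Claim_equal_remove_similar_patterns := by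
  intro l _ hpre
  unfold Spec_remove_similar_patterns remove_similar_patterns remove_similar_patterns_alt
  rw [B_dict_eq l hpre]
  have hKA := A_keys l PySem.Dict.empty hpre
  have hKB := PySem.Dict.keys_foldl_modify_key l pvKey []
    (fun _ p => (· ++ [p.2])) PySem.Dict.empty
  have hK : PySem.Set.update (PySem.Dict.empty (κ := String) (ν := List String)).keys
      (l.map pvKey) = PySem.Set.ofList (l.map pvKey) := rfl
  have hK' : PySem.Set.update (PySem.Dict.empty (κ := String) (ν := List (List String))).keys
      (l.map pvKey) = PySem.Set.ofList (l.map pvKey) := rfl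
  rw [hK] at hKA
  rw [hK'] at hKB
  rw [PySem.Dict.values_eq_map_keys _ (by rw [hKA]; exact PySem.Set.nodup_ofList _) [],
      PySem.Dict.values_eq_map_keys _ (by rw [hKB]; exact PySem.Set.nodup_ofList _) [],
      hKA, hKB, List.map_map]
  apply List.map_congr_left
  intro c _
  simp only [Function.comp_apply]
  rw [PySem.Dict.getD_eq_get?_getD, A_get? l _ c hpre, B_getD l c]
  have : (PySem.Dict.empty (κ := String) (ν := List String)).get? c = none := rfl
  rw [this, foldl_pvStep_getD]
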